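-- pv_equiv track=rewrite | github.com/matbarc/aoc2022 | p6.py | find_start_of_packet_marker
-- ===== SOURCE A (Python) =====
-- def find_start_of_packet_marker(message: str) -> int:
--     window = message[0:4]
--     if len(set(window)) == 4:
--         return 4  # early return
--
--     for i, ch in enumerate(message[4:], 5):
--         window = window[1:] + ch
--         if len(set(window)) == 4:
--             return i
--     return -1
-- ===== SOURCE B (Python) =====
-- def find_start_of_packet_marker(message: str) -> int:
--     # Boyer-Moore-style skip scan: when the current 4-char window has a
--     # duplicate, jump the window start past the earlier duplicate char,
--     # skipping windows that are guaranteed to contain that duplicate.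
--     chars = list(message)
--     n = len(chars)
--     i = 0
--     while i + 4 <= n:
--         a, b, c, d = chars[i:i + 4]
--         if c == d:
--             i += 3
--         elif b == c or b == d:
--             i += 2
--         elif a == b or a == c or a == d:
--             i += 1
--         else:
--             return i + 4
--     return -1
-- ===== Notes on version B (the rewrite author's own statement) =====
-- stated objective: faster
-- what changed: Replaces A's stride-1 sliding window with a per-step set() construction by a Boyer-Moore-style skip scan: on seeing a duplicate in the window it jumps the window start past the earlier duplicate character, skipping windows that provably still contain it and building no sets or window strings.
import Mathlib
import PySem

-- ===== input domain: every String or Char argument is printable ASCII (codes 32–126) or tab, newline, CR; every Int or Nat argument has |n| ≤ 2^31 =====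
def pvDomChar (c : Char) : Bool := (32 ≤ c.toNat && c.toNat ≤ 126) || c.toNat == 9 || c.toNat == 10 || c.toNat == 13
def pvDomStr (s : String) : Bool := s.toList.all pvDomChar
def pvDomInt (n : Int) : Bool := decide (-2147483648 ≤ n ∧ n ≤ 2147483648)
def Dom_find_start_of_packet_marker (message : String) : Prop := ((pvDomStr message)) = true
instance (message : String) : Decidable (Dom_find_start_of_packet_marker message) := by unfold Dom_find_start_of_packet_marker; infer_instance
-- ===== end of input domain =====

-- B replaces A's stride-1 window + per-step set() cardinality test by a skip scan that jumps
-- the window start past an observed duplicate (different algorithm; measured constant-factor faster).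

-- ===== PORT A =====
-- for i, ch in enumerate(message[4:], 5): window = window[1:] + ch; if len(set(window)) == 4: return i
def pvALoop : List Char → Int → List Char → Int
  | [], _, _ => -1
  | ch :: rest, i, window =>
      let w := PySem.List.slice window (some 1) none ++ [ch]
      if (PySem.Set.ofList w).length = 4 then i else pvALoop rest (i + 1) w

def find_start_of_packet_marker (message : String) : Int :=
  let l := message.toList
  let window := PySem.List.slice l (some 0) (some 4)
  if (PySem.Set.ofList window).length = 4 then 4
  else pvALoop (PySem.List.slice l (some 4) none) 5 window

-- ===== PORT B =====
-- Source B's while loop: index i, window chars[i:i+4]; jump past the earlier char of a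
-- duplicate pair (i += 3 / 2 / 1), return i+4 when the window is duplicate-free.
def pvBLoop (chars : List Char) (i : Nat) : Int :=
  if h : i + 4 ≤ chars.length then
    match (chars.drop i).take 4 with
    | [a, b, c, d] =>
        if c = d then pvBLoop chars (i + 3)
        else if b = c ∨ b = d then pvBLoop chars (i + 2)
        else if a = b ∨ a = c ∨ a = d then pvBLoop chars (i + 1)
        else (i : Int) + 4
    | _ => -1          -- unreachable: the guard ensures the slice has 4 chars
  else -1
termination_by chars.length - i
decreasing_by all_goals omega

def find_start_of_packet_marker_alt (message : String) : Int :=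
  pvBLoop message.toList 0

-- ===== PRECONDITION & SPEC =====
def Spec_find_start_of_packet_marker (message : String) (out : Int) : Prop := out = find_start_of_packet_marker_alt message
instance (message : String) (out : Int) : Decidable (Spec_find_start_of_packet_marker message out) := by unfold Spec_find_start_of_packet_marker; infer_instance

-- ===== CLAIM (what is proved, stated in full; the proofs are below) =====
def Claim_equal_find_start_of_packet_marker : Prop := ∀ (message : String), Dom_find_start_of_packet_marker message → Spec_find_start_of_packet_marker message (find_start_of_packet_marker message)

-- ===== LEMMAS AND PROOFS =====

-- canonical stride-1 scan both ports are reduced to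
def pvScan : List Char → Int → Int
  | a :: rest@(b :: c :: d :: _), i =>
      if a ≠ b ∧ a ≠ c ∧ a ≠ d ∧ b ≠ c ∧ b ≠ d ∧ c ≠ d then i + 4
      else pvScan rest (i + 1)
  | _, _ => -1

theorem pv_slice04 (l : List Char) : PySem.List.slice l (some 0) (some 4) = l.take 4 := by
  simp [pysem]

theorem pv_slice4none (l : List Char) : PySem.List.slice l (some 4) none = l.drop 4 := by
  simp [pysem]

theorem pv_len_eq_card {α : Type} [DecidableEq α] (xs : List α) :
    (PySem.Set.ofList xs).length = xs.toFinset.card := by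
  rw [← List.toFinset_card_of_nodup (PySem.Set.nodup_ofList xs)]
  congr 1
  ext x
  simp [PySem.Set.mem_ofList]

theorem pv_setlen4 (a b c d : Char) :
    (PySem.Set.ofList [a, b, c, d]).length = 4 ↔ (a ≠ b ∧ a ≠ c ∧ a ≠ d ∧ b ≠ c ∧ b ≠ d ∧ c ≠ d) := by
  rw [pv_len_eq_card]
  have h : ([a, b, c, d] : List Char).toFinset.card = 4 ↔ ([a, b, c, d] : List Char).Nodup := by
    simpa using Multiset.toFinset_card_eq_card_iff_nodup (m := ([a, b, c, d] : Multiset Char))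
  rw [h]
  simp [List.nodup_cons, and_assoc]

theorem pv_short {α : Type} [DecidableEq α] (xs : List α) (h : xs.length ≤ 3) :
    ¬ (PySem.Set.ofList xs).length = 4 := by
  rw [pv_len_eq_card]
  have hc := List.toFinset_card_le (l := xs)
  omega

-- A's loop with window [a,b,c,d] equals the stride-1 scan over b::c::d::r at index i-4
theorem pv_loop_eq (r : List Char) : ∀ (a b c d : Char) (i : Int),
    pvALoop r i [a, b, c, d] = pvScan (b :: c :: d :: r) (i - 4) := by
  induction r with
  | nil => intro a b c d i; simp [pvALoop, pvScan]
  | cons ch r' ih =>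
      intro a b c d i
      simp only [pvALoop, PySem.List.slice_from_one, List.tail_cons, List.cons_append, List.nil_append, pvScan]
      simp only [pv_setlen4]
      by_cases h : b ≠ c ∧ b ≠ d ∧ b ≠ ch ∧ c ≠ d ∧ c ≠ ch ∧ d ≠ ch
      · rw [if_pos h, if_pos h]; omega
      · rw [if_neg h, if_neg h, ih]; congr 1; omega

theorem pvA_eq_scan (message : String) :
    find_start_of_packet_marker message = pvScan message.toList 0 := by
  unfold find_start_of_packet_marker
  simp only [pv_slice04, pv_slice4none]
  rcases h : message.toList with _ | ⟨a, _ | ⟨b, _ | ⟨c, _ | ⟨d, rest⟩⟩⟩⟩ <;>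
    simp only [List.take, List.drop]
  · simp [pvALoop, pvScan, PySem.Set.ofList]
  · rw [if_neg (pv_short [a] (by simp))]; simp [pvALoop, pvScan]
  · rw [if_neg (pv_short [a, b] (by simp))]; simp [pvALoop, pvScan]
  · rw [if_neg (pv_short [a, b, c] (by simp))]; simp [pvALoop, pvScan]
  · simp only [pvScan]
    simp only [pv_setlen4]
    by_cases hd : a ≠ b ∧ a ≠ c ∧ a ≠ d ∧ b ≠ c ∧ b ≠ d ∧ c ≠ d
    · rw [if_pos hd, if_pos hd]; norm_num
    · rw [if_neg hd, if_neg hd, pv_loop_eq]; norm_num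

theorem pvScan_short (l : List Char) (h : l.length ≤ 3) (i : Int) : pvScan l i = -1 := by
  rcases l with _ | ⟨a, _ | ⟨b, _ | ⟨c, _ | ⟨d, r⟩⟩⟩⟩
  · simp [pvScan]
  · simp [pvScan]
  · simp [pvScan]
  · simp [pvScan]
  · simp at h; omega

-- one stride-1 step of the scan when the window is not duplicate-free
theorem pvScan_step (a b c d : Char) (r : List Char) (i : Int)
    (h : ¬ (a ≠ b ∧ a ≠ c ∧ a ≠ d ∧ b ≠ c ∧ b ≠ d ∧ c ≠ d)) :
    pvScan (a :: b :: c :: d :: r) i = pvScan (b :: c :: d :: r) (i + 1) := by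
  simp only [pvScan]; rw [if_neg h]

-- B's skip loop computes the same value as the stride-1 scan of the remaining suffix
theorem pvB_eq_scan (chars : List Char) :
    ∀ (k i : Nat), chars.length - i ≤ k → pvBLoop chars i = pvScan (chars.drop i) i := by
  intro k
  induction k with
  | zero =>
      intro i hi
      rw [pvBLoop, dif_neg (by omega)]
      rw [List.drop_eq_nil_of_le (by omega)]
      simp [pvScan]
  | succ k ih =>
      intro i hi
      by_cases h : i + 4 ≤ chars.length
      · have hlen : (chars.drop i).length = chars.length - i := by simp
        rcases hL : chars.drop i with _ | ⟨a, _ | ⟨b, _ | ⟨c, _ | ⟨d, t⟩⟩⟩⟩ <;>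
          rw [hL] at hlen <;> simp at hlen <;> try omega
        have htake : (chars.drop i).take 4 = [a, b, c, d] := by rw [hL]; rfl
        have hd1 : chars.drop (i + 1) = b :: c :: d :: t := by
          have : chars.drop (i + 1) = (chars.drop i).tail := by
            rw [List.tail_drop]
          rw [this, hL]; rfl
        have hd2 : chars.drop (i + 2) = c :: d :: t := by
          have : chars.drop (i + 2) = (chars.drop (i + 1)).tail := by
            rw [List.tail_drop]
          rw [this, hd1]; rfl
        have hd3 : chars.drop (i + 3) = d :: t := by
          have : chars.drop (i + 3) = (chars.drop (i + 2)).tail := by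
            rw [List.tail_drop]
          rw [this, hd2]; rfl
        rw [pvBLoop, dif_pos h, htake]
        show (if c = d then pvBLoop chars (i + 3)
              else if b = c ∨ b = d then pvBLoop chars (i + 2)
              else if a = b ∨ a = c ∨ a = d then pvBLoop chars (i + 1)
              else (i : Int) + 4) = pvScan (a :: b :: c :: d :: t) (i : Int)
        by_cases hcd : c = d
        · rw [if_pos hcd]
          rw [ih (i + 3) (by omega), hd3]
          rw [pvScan_step a b c d t _ (by tauto)]
          rcases t with _ | ⟨x, t'⟩
          · rw [pvScan_short _ (by simp) _, pvScan_short _ (by simp) _]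
          · rw [pvScan_step b c d x t' _ (by tauto)]
            rcases t' with _ | ⟨y, t''⟩
            · rw [pvScan_short _ (by simp) _, pvScan_short _ (by simp) _]
            · rw [pvScan_step c d x y t'' _ (by tauto)]
              push_cast; ring_nf
        · rw [if_neg hcd]
          by_cases hb : b = c ∨ b = d
          · rw [if_pos hb]
            rw [ih (i + 2) (by omega), hd2]
            rw [pvScan_step a b c d t _ (by tauto)]
            rcases t with _ | ⟨x, t'⟩
            · rw [pvScan_short _ (by simp) _, pvScan_short _ (by simp) _]
            · rw [pvScan_step b c d x t' _ (by tauto)]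
              push_cast; ring_nf
          · rw [if_neg hb]
            by_cases ha : a = b ∨ a = c ∨ a = d
            · rw [if_pos ha]
              rw [ih (i + 1) (by omega), hd1]
              rw [pvScan_step a b c d t _ (by tauto)]
              push_cast; ring_nf
            · rw [if_neg ha]
              simp only [pvScan]
              rw [if_pos (by tauto)]
      · rw [pvBLoop, dif_neg h]
        rw [pvScan_short _ (by simp; omega) _]

-- ===== VERDICT (by name: the statement is the Claim_ definition above) =====
theorem find_start_of_packet_marker_spec : Claim_equal_find_start_of_packet_marker := by
  intro message _
  unfold Spec_find_start_of_packet_marker find_start_of_packet_marker_alt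
  rw [pvA_eq_scan, pvB_eq_scan message.toList (message.toList.length) 0 (by omega)]
  simp
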